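-- pv_equiv track=rewrite | github.com/MariaMashkovska/algos_3.1 | beer_algo/main.py | min_beer_types
-- ===== SOURCE A (Python) =====
-- def min_beer_types(N, B, preferences):
--     beer_info = [{'index': i, 'count': 0} for i in range(B)]
--
--     for i in range(N):
--         for j in range(B):
--             if preferences[i][j] == 'Y':
--                 beer_info[j]['count'] += 1
--
--     sorted_beer_info = sorted(beer_info, key=lambda x: x['count'], reverse=True)
--
--     min_beer_types = 0
--     total_likes = 0
--     for beer in sorted_beer_info:
--         total_likes += beer['count']
--         min_beer_types += 1
--         if total_likes >= N:
--             break
--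
--     return min_beer_types
-- ===== SOURCE B (Python) =====
-- def min_beer_types(N, B, preferences):
--     # column-wise like counts, then a counting-sort style walk from the highest
--     # count downward instead of building and sorting a list of dicts
--     counts = [sum(1 for i in range(N) if preferences[i][j] == 'Y') for j in range(B)]
--     maxc = max(counts) if counts else 0
--     picked = 0
--     total = 0
--     for c in range(maxc, -1, -1):
--         for _ in range(counts.count(c)):
--             picked += 1
--             total += c
--             if total >= N:
--                 return picked
--     return picked
-- ===== Notes on version B (the rewrite author's own statement) =====
-- stated objective: alternative
-- what changed: Replaces the list-of-dicts accumulator and the descending sort with column-wise comprehension counts plus a counting-sort style walk from the maximum count downward (no sort, no dict records).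
import Mathlib
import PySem

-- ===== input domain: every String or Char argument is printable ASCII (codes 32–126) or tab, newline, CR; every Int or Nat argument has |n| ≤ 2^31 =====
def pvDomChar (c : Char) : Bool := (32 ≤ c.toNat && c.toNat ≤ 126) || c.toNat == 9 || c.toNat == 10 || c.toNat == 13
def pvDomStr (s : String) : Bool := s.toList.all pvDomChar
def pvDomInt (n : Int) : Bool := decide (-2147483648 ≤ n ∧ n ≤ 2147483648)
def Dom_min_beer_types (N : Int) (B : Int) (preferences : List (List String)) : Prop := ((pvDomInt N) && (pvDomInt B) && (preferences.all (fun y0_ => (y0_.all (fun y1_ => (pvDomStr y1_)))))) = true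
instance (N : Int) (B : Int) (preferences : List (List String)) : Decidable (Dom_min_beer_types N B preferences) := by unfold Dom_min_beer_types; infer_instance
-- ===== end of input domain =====

-- B replaces A's list-of-dicts accumulator and descending sort with column-wise
-- counts and a counting-sort style walk from the maximum count downward (objective: alternative).

-- ===== PORT A =====
-- preferences[i][j] == 'Y' (pyGet? = none exactly where Python raises IndexError; those inputs are
-- outside Pre_). Both ports evaluate this same Python expression, so both use this helper.
def aLike (preferences : List (List String)) (i j : Int) : Bool :=
  ((PySem.List.pyGet? preferences i).bind (fun row => PySem.List.pyGet? row j)) == some "Y"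

-- the final for-loop of A, with its break (beer['count'] is always present; getD 0 reads it)
def aLoop (N : Int) : List (PySem.Dict String Int) → Int → Int → Int
  | [], m, _ => m
  | beer :: rest, m, t =>
    let t' := t + beer.getD "count" 0
    let m' := m + 1
    if t' ≥ N then m' else aLoop N rest m' t'

def min_beer_types (N : Int) (B : Int) (preferences : List (List String)) : Int :=
  let beer_info : List (PySem.Dict String Int) :=
    (PySem.List.pyRange 0 B 1).map (fun i => (PySem.Dict.empty.insert "index" i).insert "count" (0 : Int))
  -- beer_info[j]['count'] += 1 ; j comes from range(B) so 0 ≤ j and j.toNat is exact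
  let beer_info2 :=
    (PySem.List.pyRange 0 N 1).foldl (fun bi i =>
      (PySem.List.pyRange 0 B 1).foldl (fun bi j =>
        if aLike preferences i j then
          bi.modify j.toNat (fun d => d.modify "count" 0 (· + 1))
        else bi) bi) beer_info
  -- sorted(beer_info, key=lambda x: x['count'], reverse=True): Python's sorted is a stable
  -- merge sort; with reverse=True ties keep their original order, which is exactly
  -- List.mergeSort with le a b := key b ≤ key a
  let sorted_beer_info := beer_info2.mergeSort
    (fun a b => decide ((b.getD "count" 0 : Int) ≤ a.getD "count" 0))
  aLoop N sorted_beer_info 0 0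

-- ===== PORT B =====
-- counts = [sum(1 for i in range(N) if preferences[i][j] == 'Y') for j in range(B)]
def bCounts (N : Int) (B : Int) (preferences : List (List String)) : List Int :=
  (PySem.List.pyRange 0 B 1).map (fun j =>
    (((PySem.List.pyRange 0 N 1).filter (fun i => aLike preferences i j)).map (fun _ => (1 : Int))).sum)

-- for _ in range(k): picked += 1; total += c; if total >= N: return picked
-- returns (picked, total, returned-early?)
def bInner (N c : Int) : Nat → Int → Int → Int × Int × Bool
  | 0, p, t => (p, t, false)
  | k + 1, p, t =>
    let p' := p + 1
    let t' := t + c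
    if t' ≥ N then (p', t', true) else bInner N c k p' t'

-- for c in range(maxc, -1, -1): …
def bOuter (N : Int) (counts : List Int) : List Int → Int → Int → Int
  | [], p, _ => p
  | c :: cs, p, t =>
    let r := bInner N c (counts.count c) p t
    if r.2.2 then r.1 else bOuter N counts cs r.1 r.2.1

def min_beer_types_alt (N : Int) (B : Int) (preferences : List (List String)) : Int :=
  let counts := bCounts N B preferences
  let maxc := (PySem.List.max? counts (fun x => x)).getD 0   -- max(counts) if counts else 0
  bOuter N counts (PySem.List.pyRange maxc (-1) (-1)) 0 0

-- ===== PRECONDITION & SPEC =====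
-- Exactly where Python A returns: when B ≥ 1 it indexes preferences[i][j] for all 0 ≤ i < N,
-- 0 ≤ j < B, so the first N rows must exist and each have at least B entries (when B ≤ 0 the
-- inner loop body never runs and A is total).
def Pre_min_beer_types (N : Int) (B : Int) (preferences : List (List String)) : Prop :=
  1 ≤ B → (N.toNat ≤ preferences.length ∧ ∀ row ∈ preferences.take N.toNat, B.toNat ≤ row.length)
instance (N : Int) (B : Int) (preferences : List (List String)) : Decidable (Pre_min_beer_types N B preferences) := by unfold Pre_min_beer_types; infer_instance

def pvWitness_min_beer_types : Int × Int × List (List String) := (2, 2, [["Y", "N"], ["Y", "Y"]])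

def Spec_min_beer_types (N : Int) (B : Int) (preferences : List (List String)) (out : Int) : Prop := out = min_beer_types_alt N B preferences
instance (N : Int) (B : Int) (preferences : List (List String)) (out : Int) : Decidable (Spec_min_beer_types N B preferences out) := by unfold Spec_min_beer_types; infer_instance

-- ===== CLAIM (what is proved, stated in full; the proofs are below) =====
def Claim_equal_min_beer_types : Prop := ∀ (N : Int) (B : Int) (preferences : List (List String)), Dom_min_beer_types N B preferences → Pre_min_beer_types N B preferences → Spec_min_beer_types N B preferences (min_beer_types N B preferences)

-- ===== LEMMAS AND PROOFS =====

-- the common greedy core both selection loops compute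
def pvGreedy (N : Int) : List Int → Int → Int → Int
  | [], m, _ => m
  | c :: cs, m, t => if t + c ≥ N then m + 1 else pvGreedy N cs (m + 1) (t + c)

theorem aLoop_eq_greedy (N : Int) (l : List (PySem.Dict String Int)) (m t : Int) :
    aLoop N l m t = pvGreedy N (l.map (fun d => d.getD "count" 0)) m t := by
  induction l generalizing m t with
  | nil => simp [aLoop, pvGreedy]
  | cons d l ih =>
    simp only [aLoop, pvGreedy, List.map_cons]
    split_ifs <;> simp [ih]

theorem pvGreedy_cons (N c : Int) (l : List Int) (p t : Int) :
    pvGreedy N (c :: l) p t = if t + c ≥ N then p + 1 else pvGreedy N l (p + 1) (t + c) := rfl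

theorem bInner_succ (N c : Int) (k : Nat) (p t : Int) :
    bInner N c (k + 1) p t = if t + c ≥ N then (p + 1, t + c, true) else bInner N c k (p + 1) (t + c) := by
  simp only [bInner]

theorem bInner_eq_greedy (N c : Int) (k : Nat) (p t : Int) (rest : List Int) :
    pvGreedy N (List.replicate k c ++ rest) p t =
      (if (bInner N c k p t).2.2 then (bInner N c k p t).1
       else pvGreedy N rest (bInner N c k p t).1 (bInner N c k p t).2.1) := by
  induction k generalizing p t with
  | zero => simp [bInner]
  | succ k ih =>
    rw [List.replicate_succ, List.cons_append, pvGreedy_cons, bInner_succ]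
    by_cases h : t + c ≥ N
    · simp [h]
    · simp only [if_neg h]
      exact ih _ _

theorem bOuter_eq_greedy (N : Int) (counts : List Int) (cs : List Int) (p t : Int) :
    bOuter N counts cs p t =
      pvGreedy N (cs.flatMap (fun c => List.replicate (counts.count c) c)) p t := by
  induction cs generalizing p t with
  | nil => simp [bOuter, pvGreedy]
  | cons c cs ih =>
    simp only [List.flatMap_cons]
    rw [bInner_eq_greedy]
    by_cases h : (bInner N c (counts.count c) p t).2.2 <;> simp [bOuter, h, ih]

-- map f commutes with List.modify when f intertwines the modification
theorem map_modify_comm {α β : Type} (f : α → β) (g : α → α) (h : β → β)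
    (hfg : ∀ a, f (g a) = h (f a)) : ∀ (n : Nat) (l : List α),
    (l.modify n g).map f = (l.map f).modify n h := by
  intro n l
  induction l generalizing n with
  | nil => simp
  | cons a l ih =>
    cases n with
    | zero => simp [hfg]
    | succ n => simp [ih]

-- map f commutes with a foldl whose step commutes with f
theorem map_foldl_comm {α β γ : Type} (f : α → β) (F : List α → γ → List α) (G : List β → γ → List β)
    (hstep : ∀ bi j, (F bi j).map f = G (bi.map f) j) :
    ∀ (l : List γ) (bi : List α), (l.foldl F bi).map f = l.foldl G (bi.map f) := by
  intro l
  induction l with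
  | nil => intro bi; simp
  | cons x l ih =>
    intro bi
    simp only [List.foldl_cons]
    rw [ih (F bi x), hstep]

-- one row pass: modify-at-each-index over range m = pointwise map
theorem foldl_modify_range (m : Nat) (P : Nat → Bool) (f : Nat → Int) :
    (List.range m).foldl (fun cs k => if P k then cs.modify k (· + 1) else cs) ((List.range m).map f)
      = (List.range m).map (fun k => f k + if P k then 1 else 0) := by
  have aux : ∀ n, n ≤ m →
      (List.range n).foldl (fun cs k => if P k then cs.modify k (· + 1) else cs) ((List.range m).map f)
        = (List.range m).map (fun k => if k < n then f k + (if P k then 1 else 0) else f k) := by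
    intro n hn
    induction n with
    | zero => simp
    | succ n ih =>
      rw [List.range_succ, List.foldl_append, ih (by omega)]
      simp only [List.foldl_cons, List.foldl_nil]
      by_cases hP : P n
      · simp only [hP, if_true]
        apply List.ext_getElem
        · simp
        · intro j h1 h2
          simp only [List.length_modify, List.length_map, List.length_range] at h1 h2
          rw [List.getElem_modify]
          simp only [List.getElem_map, List.getElem_range]
          rcases eq_or_ne n j with rfl | hne
          · simp [hP]
          · have hj : j < n ↔ j < n + 1 := by omega
            simp [hne, hj]
      · simp only [hP]
        apply List.map_congr_left
        intro a ha
        rw [List.mem_range] at ha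
        rcases eq_or_ne a n with rfl | hne
        · simp [hP]
        · have hj : a < n ↔ a < n + 1 := by omega
          simp [hj]
  rw [aux m le_rfl]
  apply List.map_congr_left
  intro a ha
  rw [List.mem_range] at ha
  simp [ha]

-- all row passes: the pure-Int double fold computes the column counts
theorem foldl_rows (m : Nat) (step : Int → Nat → Bool) :
    ∀ (I : List Int) (f : Nat → Int),
    I.foldl (fun cs i => (List.range m).foldl (fun cs k => if step i k then cs.modify k (· + 1) else cs) cs)
        ((List.range m).map f)
      = (List.range m).map (fun k => f k + ((I.filter (fun i => step i k)).length : Int)) := by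
  intro I
  induction I with
  | nil => intro f; simp
  | cons i I ih =>
    intro f
    simp only [List.foldl_cons]
    rw [foldl_modify_range m (step i) f, ih]
    apply List.map_congr_left
    intro a _
    simp only [List.filter_cons]
    by_cases h : step i a
    · simp only [h, if_true, List.length_cons]
      push_cast
      ring
    · simp [h]

-- A's beer_info after the counting loops, read through 'count', is exactly B's counts list
theorem sum_ones {α : Type} (l : List α) : (l.map fun _ => (1 : Int)).sum = l.length := by
  simp [List.map_const', List.sum_replicate]

theorem beer_info_counts (N B : Int) (preferences : List (List String)) :
    ((PySem.List.pyRange 0 N 1).foldl (fun bi i =>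
      (PySem.List.pyRange 0 B 1).foldl (fun bi j =>
        if aLike preferences i j then
          bi.modify j.toNat (fun d => d.modify "count" 0 (· + 1))
        else bi) bi)
      ((PySem.List.pyRange 0 B 1).map (fun i => (PySem.Dict.empty.insert "index" i).insert "count" (0 : Int)))).map
        (fun d => d.getD "count" 0)
    = bCounts N B preferences := by
  have hinner : ∀ (bi : List (PySem.Dict String Int)) (i : Int),
      ((PySem.List.pyRange 0 B 1).foldl (fun bi j =>
          if aLike preferences i j then bi.modify j.toNat (fun d => d.modify "count" 0 (· + 1)) else bi) bi).map
        (fun d => d.getD "count" 0)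
      = (PySem.List.pyRange 0 B 1).foldl (fun cs j =>
          if aLike preferences i j then cs.modify j.toNat (· + 1) else cs) (bi.map (fun d => d.getD "count" 0)) := by
    intro bi i
    apply map_foldl_comm
    intro bi' j
    by_cases h : aLike preferences i j
    · simpa [h] using map_modify_comm (fun d => d.getD "count" 0)
        (fun d => d.modify "count" 0 (· + 1)) (· + 1)
        (fun d => PySem.Dict.getD_modify_self d "count" 0 (· + 1)) j.toNat bi'
    · simp [h]
  rw [map_foldl_comm (fun d => d.getD "count" 0) _
      (fun cs i => (PySem.List.pyRange 0 B 1).foldl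
        (fun cs j => if aLike preferences i j then cs.modify j.toNat (· + 1) else cs) cs)
      (fun bi i => hinner bi i)]
  rw [List.map_map]
  have hinit : ((PySem.List.pyRange 0 B 1).map
      ((fun d => d.getD "count" 0) ∘ fun i => (PySem.Dict.empty.insert "index" i).insert "count" (0 : Int)))
      = (PySem.List.pyRange 0 B 1).map (fun _ => (0 : Int)) := by
    apply List.map_congr_left
    intro a _
    simp [PySem.Dict.getD_insert_self]
  rw [hinit]
  unfold bCounts
  rw [PySem.List.pyRange_one 0 B]
  simp only [List.foldl_map, List.map_map, Function.comp_def, zero_add, Int.toNat_natCast, Int.sub_zero]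
  rw [foldl_rows B.toNat (fun i k => aLike preferences i (k : Int)) (PySem.List.pyRange 0 N 1) (fun _ => (0 : Int))]
  apply List.map_congr_left
  intro k _
  rw [sum_ones]
  simp only [zero_add]

theorem bCounts_nonneg (N B : Int) (preferences : List (List String)) :
    ∀ c ∈ bCounts N B preferences, 0 ≤ c := by
  intro c hc
  unfold bCounts at hc
  obtain ⟨j, _, rfl⟩ := List.mem_map.mp hc
  rw [sum_ones]
  exact Int.natCast_nonneg _

-- sum over a nodup list of an indicator-weighted term
theorem sum_map_nodup (v : Int) (K : Int → Nat) :
    ∀ (cs : List Int), cs.Nodup →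
    (cs.map (fun c => if c = v then K c else 0)).sum = if v ∈ cs then K v else 0 := by
  intro cs
  induction cs with
  | nil => simp
  | cons c cs ih =>
    intro h
    rw [List.nodup_cons] at h
    simp only [List.map_cons, List.sum_cons]
    by_cases hcv : c = v
    · subst hcv
      rw [ih h.2]
      simp [h.1]
    · rw [ih h.2]
      have hvc : v ≠ c := fun e => hcv e.symm
      simp [hcv, List.mem_cons, hvc]

-- the countdown expansion is descending
theorem expansion_pairwise (counts : List Int) : ∀ (cs : List Int), cs.Pairwise (fun a b => b < a) →
    (cs.flatMap (fun c => List.replicate (counts.count c) c)).Pairwise (fun a b => b ≤ a) := by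
  intro cs
  induction cs with
  | nil => simp
  | cons c cs ih =>
    intro h
    rw [List.pairwise_cons] at h
    simp only [List.flatMap_cons]
    rw [List.pairwise_append]
    refine ⟨List.pairwise_replicate.mpr (Or.inr le_rfl), ih h.2, ?_⟩
    intro a ha b hb
    obtain ⟨c', hc', hb'⟩ := List.mem_flatMap.mp hb
    rw [List.eq_of_mem_replicate ha, List.eq_of_mem_replicate hb']
    exact le_of_lt (h.1 c' hc')

-- the countdown expansion is a permutation of counts
theorem expansion_perm (counts : List Int) (maxc : Int)
    (h0 : ∀ c ∈ counts, 0 ≤ c) (hm : ∀ c ∈ counts, c ≤ maxc) :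
    ((PySem.List.pyRange maxc (-1) (-1)).flatMap (fun c => List.replicate (counts.count c) c)).Perm counts := by
  rw [List.perm_iff_count]
  intro v
  rw [List.count_flatMap]
  have hn : (PySem.List.pyRange maxc (-1) (-1)).Nodup := by
    rw [PySem.List.pyRange_neg_one_eq_reverse]
    exact List.nodup_reverse.mpr (PySem.List.nodup_pyRange_one _ _)
  have hmap : (List.map (List.count v ∘ fun c => List.replicate (counts.count c) c)
      (PySem.List.pyRange maxc (-1) (-1)))
      = (PySem.List.pyRange maxc (-1) (-1)).map (fun c => if c = v then counts.count c else 0) := by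
    apply List.map_congr_left
    intro c _
    simp [List.count_replicate]
  rw [hmap, sum_map_nodup v _ _ hn]
  by_cases hv : v ∈ PySem.List.pyRange maxc (-1) (-1)
  · simp [hv]
  · rw [if_neg hv]
    rw [eq_comm, List.count_eq_zero]
    intro hvc
    exact hv (PySem.List.mem_pyRange_neg_one.mpr ⟨by have := h0 v hvc; omega, hm v hvc⟩)

-- the sorted count column of A equals B's countdown expansion
theorem sorted_eq_expansion (N B : Int) (preferences : List (List String)) :
    ((((PySem.List.pyRange 0 N 1).foldl (fun bi i =>
          (PySem.List.pyRange 0 B 1).foldl (fun bi j =>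
            if aLike preferences i j then
              bi.modify j.toNat (fun d => d.modify "count" 0 (· + 1))
            else bi) bi)
          ((PySem.List.pyRange 0 B 1).map (fun i => (PySem.Dict.empty.insert "index" i).insert "count" (0 : Int)))).mergeSort
        (fun a b => decide ((b.getD "count" 0 : Int) ≤ a.getD "count" 0))).map (fun d => d.getD "count" 0))
    = (PySem.List.pyRange ((PySem.List.max? (bCounts N B preferences) (fun x => x)).getD 0) (-1) (-1)).flatMap
        (fun c => List.replicate ((bCounts N B preferences).count c) c) := by
  have hm : ∀ c ∈ bCounts N B preferences,
      c ≤ (PySem.List.max? (bCounts N B preferences) (fun x => x)).getD 0 := by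
    intro c hc
    cases hmax : PySem.List.max? (bCounts N B preferences) (fun x => x) with
    | none =>
      rw [PySem.List.max?_eq_none_iff] at hmax
      rw [hmax] at hc
      simp at hc
    | some m => simpa using PySem.List.max?_isMax hmax c hc
  have hperm := expansion_perm (bCounts N B preferences) _ (bCounts_nonneg N B preferences) hm
  have hdesc : (PySem.List.pyRange ((PySem.List.max? (bCounts N B preferences) (fun x => x)).getD 0)
      (-1) (-1)).Pairwise (fun a b => b < a) := by
    rw [PySem.List.pyRange_neg_one_eq_reverse]
    exact List.pairwise_reverse.mpr (PySem.List.pairwise_lt_pyRange_one _ _)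
  have hpair := expansion_pairwise (bCounts N B preferences) _ hdesc
  have hSperm := (List.mergeSort_perm
    ((PySem.List.pyRange 0 N 1).foldl (fun bi i =>
      (PySem.List.pyRange 0 B 1).foldl (fun bi j =>
        if aLike preferences i j then
          bi.modify j.toNat (fun d => d.modify "count" 0 (· + 1))
        else bi) bi)
      ((PySem.List.pyRange 0 B 1).map (fun i => (PySem.Dict.empty.insert "index" i).insert "count" (0 : Int))))
    (fun a b => decide ((b.getD "count" 0 : Int) ≤ a.getD "count" 0))).map (fun d => d.getD "count" 0)
  rw [beer_info_counts] at hSperm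
  have hms := List.pairwise_mergeSort
    (le := fun a b : PySem.Dict String Int => decide ((b.getD "count" 0 : Int) ≤ a.getD "count" 0))
    (by intro a b c h1 h2; simp only [decide_eq_true_eq] at *; omega)
    (by intro a b; simp only [Bool.or_eq_true, decide_eq_true_eq]; omega)
    ((PySem.List.pyRange 0 N 1).foldl (fun bi i =>
      (PySem.List.pyRange 0 B 1).foldl (fun bi j =>
        if aLike preferences i j then
          bi.modify j.toNat (fun d => d.modify "count" 0 (· + 1))
        else bi) bi)
      ((PySem.List.pyRange 0 B 1).map (fun i => (PySem.Dict.empty.insert "index" i).insert "count" (0 : Int))))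
  simp only [decide_eq_true_eq] at hms
  exact List.Perm.eq_of_pairwise (fun a b _ _ h1 h2 => le_antisymm h2 h1)
    (List.Pairwise.map _ (fun a b h => h) hms)
    hpair (hSperm.trans hperm.symm)

-- ===== VERDICT (by name: the statement is the Claim_ definition above) =====
theorem min_beer_types_spec : Claim_equal_min_beer_types := by
  intro N B preferences _ _
  unfold Spec_min_beer_types min_beer_types min_beer_types_alt
  rw [aLoop_eq_greedy, bOuter_eq_greedy, sorted_eq_expansion]
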